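-- pv_equiv track=rewrite | github.com/git-hub-cc/CCli | scripts/python/scan-path.py | get_force_expand_dirs
-- ===== SOURCE A (Python) =====
-- def get_force_expand_dirs(ignore_patterns):
--     force_expand = set()
--     for pattern in ignore_patterns:
--         p = pattern.replace('\\', '/').strip('/')
--         parts = p.split('/')
--         if len(parts) > 1:
--             current = ""
--             for part in parts[:-1]:
--                 current = current + "/" + part if current else part
--                 force_expand.add(current)
--     return force_expand
-- ===== SOURCE B (Python) =====
-- def get_force_expand_dirs(ignore_patterns):
--     force_expand = set()
--     for pattern in ignore_patterns:
--         parts = pattern.replace('\\', '/').strip('/').split('/')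
--         for i in range(1, len(parts)):
--             force_expand.add('/'.join(parts[:i]))
--     return force_expand
-- ===== Notes on version B (the rewrite author's own statement) =====
-- stated objective: simpler
-- what changed: B drops A's threaded `current` accumulator and the len(parts)>1 guard: each ancestor prefix is derived independently as '/'.join(parts[:i]) for i in range(1, len(parts)) and added to the set.
import Mathlib
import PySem

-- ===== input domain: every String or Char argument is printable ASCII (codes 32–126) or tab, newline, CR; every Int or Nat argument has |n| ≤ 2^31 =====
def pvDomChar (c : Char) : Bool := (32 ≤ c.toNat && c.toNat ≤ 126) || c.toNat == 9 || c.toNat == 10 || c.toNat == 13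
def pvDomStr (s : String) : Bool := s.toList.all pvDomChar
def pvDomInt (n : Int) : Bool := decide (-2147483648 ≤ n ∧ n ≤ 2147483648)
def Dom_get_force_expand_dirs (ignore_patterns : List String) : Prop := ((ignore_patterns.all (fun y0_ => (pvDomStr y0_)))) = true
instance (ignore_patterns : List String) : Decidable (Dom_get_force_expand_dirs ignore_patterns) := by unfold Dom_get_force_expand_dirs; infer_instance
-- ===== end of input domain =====

-- B replaces A's threaded `current` accumulator (and its length guard) by deriving each
-- ancestor prefix independently as '/'.join(parts[:i]) for i in range(1, len(parts)): simpler, same cost.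

-- ===== PORT A =====
-- A-side helper: the body of A's inner loop (current extension + set insert), named for the proofs.
def pvStepA (st : String × PySem.Set String) (part : String) : String × PySem.Set String :=
  let current := if st.1 = "" then part else st.1 ++ "/" ++ part
  (current, PySem.Set.add st.2 current)

def get_force_expand_dirs (ignore_patterns : List String) : List String :=
  ignore_patterns.foldl (fun force_expand pattern =>
    let p := PySem.Str.stripChars (PySem.Str.replace pattern "\\" "/") "/"
    let parts := (PySem.Str.split? p "/").getD []
    if 1 < parts.length then
      ((PySem.List.slice parts none (some (-1))).foldl pvStepA ("", force_expand)).2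
    else force_expand) PySem.Set.empty

-- ===== PORT B =====
def get_force_expand_dirs_alt (ignore_patterns : List String) : List String :=
  ignore_patterns.foldl (fun force_expand pattern =>
    let parts := (PySem.Str.split? (PySem.Str.stripChars (PySem.Str.replace pattern "\\" "/") "/") "/").getD []
    (PySem.List.pyRange 1 (parts.length : Int) 1).foldl
      (fun s i => PySem.Set.add s (PySem.Str.join "/" (PySem.List.slice parts none (some i))))
      force_expand) PySem.Set.empty

-- ===== PRECONDITION & SPEC =====
def Spec_get_force_expand_dirs (ignore_patterns : List String) (out : List String) : Prop := out = get_force_expand_dirs_alt ignore_patterns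
instance (ignore_patterns : List String) (out : List String) : Decidable (Spec_get_force_expand_dirs ignore_patterns out) := by unfold Spec_get_force_expand_dirs; infer_instance

-- ===== CLAIM (what is proved, stated in full; the proofs are below) =====
def Claim_equal_get_force_expand_dirs : Prop := ∀ (ignore_patterns : List String), Dom_get_force_expand_dirs ignore_patterns → Spec_get_force_expand_dirs ignore_patterns (get_force_expand_dirs ignore_patterns)

-- ===== LEMMAS AND PROOFS =====

-- "/"-prefixed concatenation of a list of segments: pvSj [a,b] = "/a/b"
def pvSj : List String → String
  | [] => ""
  | p :: t => "/" ++ p ++ pvSj t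

theorem pvJoin_cons (m : List String) : ∀ (x : String), PySem.Str.join "/" (x :: m) = x ++ pvSj m := by
  induction m with
  | nil =>
      intro x
      rw [← String.toList_inj]
      simp [PySem.Str.toList_join, PySem.Chars.join_singleton, pvSj]
  | cons p t ih =>
      intro x
      have h : PySem.Str.join "/" (x :: p :: t) = x ++ "/" ++ PySem.Str.join "/" (p :: t) := by
        rw [← String.toList_inj]
        simp [PySem.Str.toList_join, PySem.Chars.join_cons_cons, String.toList_append]
      rw [h, ih p]
      show x ++ "/" ++ (p ++ pvSj t) = x ++ ("/" ++ p ++ pvSj t)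
      simp [String.append_assoc]

theorem pvNeEmpty (cur p : String) : cur ++ "/" ++ p ≠ "" := by
  intro h
  have := congrArg String.toList h
  simp [String.toList_append] at this

-- running `current` of A's inner loop
def pvFcat (cur : String) (l : List String) : String := l.foldl (fun c p => c ++ "/" ++ p) cur

theorem pvMain (pre : List String) : ∀ (cur : String) (s : PySem.Set String), cur ≠ "" →
    pre.foldl pvStepA (cur, s)
      = (pvFcat cur pre,
         (List.range pre.length).foldl
           (fun s' k => PySem.Set.add s' (cur ++ pvSj (pre.take (k+1)))) s) := by
  induction pre with
  | nil => intro cur s _; simp [pvFcat]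
  | cons p t ih =>
      intro cur s h
      have hs : pvStepA (cur, s) p = (cur ++ "/" ++ p, PySem.Set.add s (cur ++ "/" ++ p)) := by
        simp [pvStepA, h]
      rw [List.foldl_cons, hs, ih _ _ (pvNeEmpty cur p)]
      have h1 : pvFcat (cur ++ "/" ++ p) t = pvFcat cur (p :: t) := rfl
      rw [h1]
      have h2 : (List.range (p :: t).length).foldl
          (fun s' k => PySem.Set.add s' (cur ++ pvSj ((p :: t).take (k+1)))) s
          = (List.range t.length).foldl
              (fun s' k => PySem.Set.add s' ((cur ++ "/" ++ p) ++ pvSj (t.take (k+1))))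
              (PySem.Set.add s (cur ++ "/" ++ p)) := by
        rw [List.length_cons, List.range_succ_eq_map, List.foldl_cons, List.foldl_map]
        have h0 : PySem.Set.add s (cur ++ pvSj ((p :: t).take (0+1))) = PySem.Set.add s (cur ++ "/" ++ p) := by
          simp [pvSj, String.append_empty, String.append_assoc]
        rw [h0]
        apply PySem.List.foldl_congr_mem
        intro acc k _
        have : (p :: t).take (k.succ + 1) = p :: t.take (k+1) := rfl
        rw [this]
        show PySem.Set.add acc (cur ++ ("/" ++ p ++ pvSj (t.take (k+1))))
           = PySem.Set.add acc (cur ++ "/" ++ p ++ pvSj (t.take (k+1)))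
        simp [String.append_assoc]
      rw [h2]

-- defining equations of PySem.Chars.splitOn.go
theorem pvGo0 (sep : List Char) (l cur : List Char) (acc : List (List Char)) :
    PySem.Chars.splitOn.go sep 0 l cur acc = ((cur.reverse ++ l) :: acc).reverse := by
  rw [PySem.Chars.splitOn.go]

theorem pvGoNil (sep : List Char) (fuel : Nat) (cur : List Char) (acc : List (List Char)) :
    PySem.Chars.splitOn.go sep (fuel+1) [] cur acc = (cur.reverse :: acc).reverse := by
  rw [PySem.Chars.splitOn.go]; omega

theorem pvGoCons (sep : List Char) (fuel : Nat) (c : Char) (rest cur : List Char) (acc : List (List Char)) :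
    PySem.Chars.splitOn.go sep (fuel+1) (c :: rest) cur acc =
      if sep.isPrefixOf (c :: rest) then
        PySem.Chars.splitOn.go sep fuel (List.drop sep.length (c :: rest)) [] (cur.reverse :: acc)
      else PySem.Chars.splitOn.go sep fuel rest (c :: cur) acc := by
  rw [PySem.Chars.splitOn.go]

theorem pvGoShape (sep : List Char) (fuel : Nat) : ∀ (l cur : List Char) (acc : List (List Char)),
    ∃ v rest, PySem.Chars.splitOn.go sep fuel l cur acc = acc.reverse ++ v :: rest ∧ cur.reverse <+: v := by
  induction fuel with
  | zero =>
      intro l cur acc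
      exact ⟨cur.reverse ++ l, [], by rw [pvGo0]; simp, List.prefix_append _ _⟩
  | succ n ih =>
      intro l cur acc
      cases l with
      | nil => exact ⟨cur.reverse, [], by rw [pvGoNil]; simp, List.prefix_refl _⟩
      | cons c rest =>
          rw [pvGoCons]
          by_cases hp : sep.isPrefixOf (c :: rest)
          · simp only [hp, if_true]
            obtain ⟨v, r, he, _⟩ := ih (List.drop sep.length (c :: rest)) [] (cur.reverse :: acc)
            refine ⟨cur.reverse, v :: r, ?_, List.prefix_refl _⟩
            rw [he]; simp
          · simp only [hp]
            obtain ⟨v, r, he, hv⟩ := ih rest (c :: cur) acc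
            refine ⟨v, r, he, ?_⟩
            exact List.IsPrefix.trans (by simpa using List.prefix_append cur.reverse [c]) hv

theorem pvSplitHead (c : Char) (r : List Char) (hc : c ≠ '/') :
    ∃ v rest, PySem.Chars.splitOn (c :: r) ['/'] = v :: rest ∧ v ≠ [] := by
  unfold PySem.Chars.splitOn
  have hl : (c :: r).length + 1 = (r.length + 1) + 1 := by simp
  rw [hl, pvGoCons]
  have hp : List.isPrefixOf ['/'] (c :: r) = false := by
    simp [List.isPrefixOf]
    exact fun h => hc h.symm
  rw [hp]; simp only [Bool.false_eq_true, if_false]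
  obtain ⟨v, rest, he, hv⟩ := pvGoShape ['/'] (r.length + 1) r [c] []
  refine ⟨v, rest, by simpa using he, ?_⟩
  intro hnil
  rw [hnil] at hv
  simp at hv

theorem pvDropWhileHead (p : Char → Bool) (l : List Char) (a : Char) (t : List Char)
    (h : List.dropWhile p l = a :: t) : p a = false := by
  induction l with
  | nil => simp at h
  | cons b bs ih =>
      rw [List.dropWhile_cons] at h
      by_cases hb : p b
      · simp [hb] at h; exact ih h
      · simp [hb] at h; rw [h.1] at hb; simpa using hb

theorem pvStripHead (cs : List Char) :
    PySem.Chars.stripChars cs ['/'] = [] ∨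
      ∃ c r, PySem.Chars.stripChars cs ['/'] = c :: r ∧ c ≠ '/' := by
  unfold PySem.Chars.stripChars
  cases hw : (List.dropWhile (fun c => List.contains ['/'] c)
      (List.dropWhile (fun c => List.contains ['/'] c) cs).reverse).reverse with
  | nil => exact Or.inl rfl
  | cons c r =>
      refine Or.inr ⟨c, r, rfl, ?_⟩
      have hpref : (c :: r) <+: List.dropWhile (fun c => List.contains ['/'] c) cs := by
        rw [← hw]
        have hsuf := List.dropWhile_suffix (l := (List.dropWhile (fun c => List.contains ['/'] c) cs).reverse)
          (fun c => List.contains ['/'] c)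
        have := hsuf.reverse
        simpa using this
      obtain ⟨tl, htl⟩ := hpref
      have hcons : List.dropWhile (fun c => List.contains ['/'] c) cs = c :: (r ++ tl) := by
        rw [← htl]; simp
      have := pvDropWhileHead (fun c => List.contains ['/'] c) cs c (r ++ tl) hcons
      simpa using this

theorem pvParts (q : String) :
    (PySem.Str.split? q "/").getD [] = (PySem.Chars.splitOn q.toList ['/']).map String.ofList := by
  simp [PySem.Str.split?, PySem.Chars.split?]

theorem pvOfListNe (v : List Char) (h : v ≠ []) : String.ofList v ≠ "" := by
  intro he
  apply h
  have := congrArg String.toList he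
  simpa using this


theorem pvBodyAux3 (x y : String) (t : List String) (hx : x ≠ "") (s : PySem.Set String) :
    ((PySem.List.slice (x :: y :: t) none (some (-1))).foldl pvStepA ("", s)).2
    = (PySem.List.pyRange 1 (((x :: y :: t).length : Nat) : Int) 1).foldl
        (fun s' i => PySem.Set.add s' (PySem.Str.join "/" (PySem.List.slice (x :: y :: t) none (some i)))) s := by
  rw [PySem.List.slice_to_neg_one]
  have hdl : (x :: y :: t).dropLast = x :: (y :: t).dropLast := rfl
  rw [hdl, List.foldl_cons]
  have h1 : pvStepA ("", s) x = (x, PySem.Set.add s x) := by simp [pvStepA]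
  rw [h1, pvMain _ _ _ hx]
  dsimp only
  have hlen : (y :: t).dropLast.length = t.length := by simp
  rw [hlen]
  have hn : (((x :: y :: t).length : Nat) : Int) = ((t.length + 2 : Nat) : Int) := by
    simp [List.length_cons]; omega
  rw [hn, PySem.List.pyRange_of_pos _ _ (by norm_num)]
  have hcount : (if (1:Int) < ((t.length + 2 : Nat) : Int) then ((((t.length + 2 : Nat) : Int) - 1 + 1 - 1)/1).toNat else 0) = t.length + 1 := by
    rw [if_pos (by push_cast; omega)]
    simp only [Int.ediv_one]
    omega
  rw [hcount, List.foldl_map]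
  have hB : ∀ (s' : PySem.Set String) (k : Nat), k ∈ List.range (t.length + 1) →
      PySem.Set.add s' (PySem.Str.join "/" (PySem.List.slice (x :: y :: t) none (some (1 + 1 * (k : Int)))))
      = PySem.Set.add s' (x ++ pvSj ((y :: t).take k)) := by
    intro s' k _
    have hc : (1 + 1 * (k : Int)) = ((k + 1 : Nat) : Int) := by push_cast; ring
    rw [hc, PySem.List.slice_to_natCast, List.take_succ_cons, pvJoin_cons]
  rw [PySem.List.foldl_congr_mem _ _ _ _ hB]
  rw [List.range_succ_eq_map, List.foldl_cons, List.foldl_map]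
  have h0 : PySem.Set.add s (x ++ pvSj ((y :: t).take 0)) = PySem.Set.add s x := by
    simp [pvSj, String.append_empty]
  rw [h0]
  apply PySem.List.foldl_congr_mem
  intro acc k hk
  have hk' : k < t.length := List.mem_range.mp hk
  have hdt : (y :: t).dropLast.take (k+1) = (y :: t).take (k+1) := by
    rw [List.dropLast_eq_take, List.take_take]
    congr 1
    simp
    omega
  rw [hdt]


-- the two per-pattern loop bodies agree for every accumulator set
theorem pvBody (s : PySem.Set String) (pattern : String) :
    (let p := PySem.Str.stripChars (PySem.Str.replace pattern "\\" "/") "/"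
     let parts := (PySem.Str.split? p "/").getD []
     if 1 < parts.length then
       ((PySem.List.slice parts none (some (-1))).foldl pvStepA ("", s)).2
     else s)
    = (let parts := (PySem.Str.split? (PySem.Str.stripChars (PySem.Str.replace pattern "\\" "/") "/") "/").getD []
       (PySem.List.pyRange 1 (parts.length : Int) 1).foldl
         (fun t i => PySem.Set.add t (PySem.Str.join "/" (PySem.List.slice parts none (some i)))) s) := by
  have hsl : ("/" : String).toList = ['/'] := by simp
  simp only [pvParts, PySem.Str.toList_stripChars, hsl]
  rcases pvStripHead ((PySem.Str.replace pattern "\\" "/").toList) with h | ⟨c, r, hcr, hc⟩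
  · simp only [h]
    have hsp0 : PySem.Chars.splitOn ([] : List Char) ['/'] = [[]] := by decide
    simp only [hsp0, List.map_cons, List.map_nil, List.length_cons, List.length_nil]
    have hpr : PySem.List.pyRange 1 ((0 + 1 : Nat) : Int) 1 = [] := by decide
    simp only [hpr, List.foldl_nil]
    norm_num
  · simp only [hcr]
    obtain ⟨v, rest, hsp, hv⟩ := pvSplitHead c r hc
    simp only [hsp, List.map_cons]
    cases rest with
    | nil =>
        simp only [List.map_nil, List.length_cons, List.length_nil]
        have hpr : PySem.List.pyRange 1 ((0 + 1 : Nat) : Int) 1 = [] := by decide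
        simp only [hpr, List.foldl_nil]
        norm_num
    | cons w ws =>
        simp only [List.map_cons]
        have := pvBodyAux3 (String.ofList v) (String.ofList w) (ws.map String.ofList) (pvOfListNe v hv) s
        simpa using this

-- ===== VERDICT (by name: the statement is the Claim_ definition above) =====
theorem get_force_expand_dirs_spec : Claim_equal_get_force_expand_dirs := by
  intro l _
  unfold Spec_get_force_expand_dirs get_force_expand_dirs get_force_expand_dirs_alt
  exact PySem.List.foldl_congr_mem l _ _ PySem.Set.empty (fun acc x _ => pvBody acc x)
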